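-- pv_equiv track=rewrite | github.com/ATPs/xiaolongTools | utils/speciesCharacter/compute_conserved_letter_dna_withCloseGroup_exclusion_threads.py | collapse_seq_forGenus
-- ===== SOURCE A (Python) =====
-- gapChars = set(['-', 'N'])
--
-- def collapse_seq_forGenus(seqlist):
--     #this sequence is intentionally used for checking if the close species has a gap in the position
--     #so when collapsing for genus, '-' is gap and 'N' is can not sure
--     '''
--     for each site, return '-' if with only gap chars '-' or 'N'
--     return base if all are the same
--     return N in other cases
--     '''
--     new = []
--     for i in range(len(seqlist[0])):
--         chars = [seq[i] for seq in seqlist if seq[i] not in gapChars]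
--         if len(chars) == 0:
--             new.append('-')
--         else:
--             check = set(chars)
--             if len(check) == 1:
--                 new.append(chars.pop())
--             else:
--                 new.append('N')
--     return ''.join(new)
-- ===== SOURCE B (Python) =====
-- gapChars = set(['-', 'N'])
--
-- def collapse_seq_forGenus(seqlist):
--     # row-major single pass: running per-column consensus
--     # state[i]: None = only gaps so far, a char = all non-gap chars agreed, 'N' = conflict
--     n = len(seqlist[0])
--     state = [None] * n
--     for seq in seqlist:
--         for i in range(n):
--             c = seq[i]
--             if c in gapChars:
--                 continue
--             if state[i] is None:
--                 state[i] = c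
--             elif state[i] != c:
--                 state[i] = 'N'
--     return ''.join('-' if v is None else v for v in state)
-- ===== Notes on version B (the rewrite author's own statement) =====
-- stated objective: alternative
-- what changed: Column-major scan that materialises each column's non-gap char list and a set per site is replaced by a single row-major pass over the sequences updating a per-column running consensus cell (None / agreed char / 'N'), with no per-column list or set built.
import Mathlib
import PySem

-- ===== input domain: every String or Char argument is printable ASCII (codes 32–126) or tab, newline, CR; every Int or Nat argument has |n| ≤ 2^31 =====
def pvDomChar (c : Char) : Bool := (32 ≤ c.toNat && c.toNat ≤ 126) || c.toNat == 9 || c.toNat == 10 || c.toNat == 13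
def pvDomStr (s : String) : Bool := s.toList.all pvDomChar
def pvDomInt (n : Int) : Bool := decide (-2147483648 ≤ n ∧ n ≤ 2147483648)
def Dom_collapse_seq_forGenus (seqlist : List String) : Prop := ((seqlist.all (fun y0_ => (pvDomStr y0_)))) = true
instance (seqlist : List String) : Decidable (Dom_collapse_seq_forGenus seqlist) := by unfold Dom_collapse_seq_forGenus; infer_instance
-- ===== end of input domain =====

-- ===== PORT A =====
-- B replaces the per-column list+set computation by a row-major running-consensus pass (same cost).
def gapCharsSet : PySem.Set Char := PySem.Set.ofList ['-', 'N']

def collapse_seq_forGenus (seqlist : List String) : String :=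
  let new : List Char :=
    (PySem.List.pyRange 0 (PySem.Str.len ((PySem.List.pyGet? seqlist 0).getD "")) 1).foldl
      (fun new i =>
        let chars : List Char :=
          (seqlist.filter
            (fun seq => !(gapCharsSet.contains ((PySem.Str.pyGet? seq i).getD ' ')))).map
            (fun seq => (PySem.Str.pyGet? seq i).getD ' ')
        if chars.length = 0 then new ++ ['-']
        else
          let check : PySem.Set Char := PySem.Set.ofList chars
          if check.length = 1 then new ++ [((PySem.List.pop? chars).map Prod.fst).getD ' ']
          else new ++ ['N']) []
  String.mk new

-- ===== PORT B =====
-- one cell update of the running consensus (Source B's inner-loop body)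
def updCell (st : Option Char) (c : Char) : Option Char :=
  if c = '-' ∨ c = 'N' then st
  else match st with
    | none => some c
    | some d => if d = c then some d else some 'N'

def collapse_seq_forGenus_alt (seqlist : List String) : String :=
  let n : Nat := ((PySem.List.pyGet? seqlist 0).getD "").toList.length
  let state : List (Option Char) :=
    seqlist.foldl
      (fun state seq =>
        (List.range n).map (fun i => updCell (state.getD i none) (seq.toList.getD i ' ')))
      (List.replicate n none)
  String.mk (state.map (fun v => v.getD '-'))

-- ===== PRECONDITION & SPEC =====
-- Pre_ excludes exactly the inputs where A raises IndexError: the empty list and ragged lists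
-- where some sequence is shorter than the first one.
def Pre_collapse_seq_forGenus (seqlist : List String) : Prop :=
  seqlist ≠ [] ∧ ∀ s ∈ seqlist, (seqlist.headD "").toList.length ≤ s.toList.length
instance (seqlist : List String) : Decidable (Pre_collapse_seq_forGenus seqlist) := by
  unfold Pre_collapse_seq_forGenus; infer_instance
def pvWitness_collapse_seq_forGenus : List String := ["AC-G", "ACTG", "AN-G"]

def Spec_collapse_seq_forGenus (seqlist : List String) (out : String) : Prop := out = collapse_seq_forGenus_alt seqlist
instance (seqlist : List String) (out : String) : Decidable (Spec_collapse_seq_forGenus seqlist out) := by unfold Spec_collapse_seq_forGenus; infer_instance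

-- ===== CLAIM (what is proved, stated in full; the proofs are below) =====
def Claim_equal_collapse_seq_forGenus : Prop := ∀ (seqlist : List String), Dom_collapse_seq_forGenus seqlist → Pre_collapse_seq_forGenus seqlist → Spec_collapse_seq_forGenus seqlist (collapse_seq_forGenus seqlist)

-- ===== LEMMAS AND PROOFS =====

-- the character program reads at column k (total form used by both normal forms)
def cchar (s : String) (k : Nat) : Char := s.toList.getD k ' '

def nonGap (c : Char) : Bool := !(c = '-' ∨ c = 'N')

-- non-gap chars of column k
def colChars (seqlist : List String) (k : Nat) : List Char :=
  (seqlist.map (fun s => cchar s k)).filter nonGap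

-- A's per-column answer
def colA (fs : List Char) : Char :=
  if fs.length = 0 then '-'
  else if (PySem.Set.ofList fs).length = 1 then fs.getLastD ' '
  else 'N'

-- B's per-column answer
def colB (seqlist : List String) (k : Nat) : Option Char :=
  seqlist.foldl (fun st s => updCell st (cchar s k)) none

theorem contains_gap (c : Char) :
    gapCharsSet.contains c = !(nonGap c) := by
  simp [gapCharsSet, nonGap, PySem.Set.mem_ofList]

-- A's per-site character, as the port computes it
def aChar (seqlist : List String) (i : Int) : Char :=
  let chars : List Char :=
    (seqlist.filter
      (fun seq => !(gapCharsSet.contains ((PySem.Str.pyGet? seq i).getD ' ')))).map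
      (fun seq => (PySem.Str.pyGet? seq i).getD ' ')
  if chars.length = 0 then '-'
  else if (PySem.Set.ofList chars).length = 1 then
    ((PySem.List.pop? chars).map Prod.fst).getD ' '
  else 'N'

theorem aChar_eq (seqlist : List String) (k : Nat) :
    aChar seqlist (0 + (k : Int)) = colA (colChars seqlist k) := by
  have hcc : ∀ s : String,
      (PySem.Str.pyGet? s (0 + (k : Int))).getD ' ' = cchar s k := by
    intro s
    rw [Int.zero_add, PySem.Str.pyGet?_natCast, cchar, List.getD_eq_getElem?_getD]
  have hfilter :
      (seqlist.filter
        (fun seq => !(gapCharsSet.contains ((PySem.Str.pyGet? seq (0 + (k:Int))).getD ' ')))).map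
        (fun seq => (PySem.Str.pyGet? seq (0 + (k:Int))).getD ' ') = colChars seqlist k := by
    simp only [hcc, contains_gap, Bool.not_not]
    rw [colChars, List.filter_map]
    rfl
  simp only [aChar, hfilter]
  rcases hh : colChars seqlist k with _ | ⟨a, t⟩
  · simp [colA]
  · have hpop : ((PySem.List.pop? (a :: t)).map Prod.fst).getD ' ' = (a :: t).getLastD ' ' := by
      obtain ⟨ys, y, hy⟩ := (a :: t).eq_nil_or_concat.resolve_left (by simp)
      rw [List.concat_eq_append] at hy
      rw [hy, PySem.List.pop?_last]
      simp
    simp only [colA, List.length_cons]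
    split_ifs <;> first | rfl | exact hpop

-- A normal form
theorem portA_eq (seqlist : List String) (h : Pre_collapse_seq_forGenus seqlist) :
    collapse_seq_forGenus seqlist =
      String.mk ((List.range (seqlist.headD "").toList.length).map
        (fun k => colA (colChars seqlist k))) := by
  obtain ⟨hne, hlen⟩ := h
  obtain ⟨s0, rest, rfl⟩ := List.exists_cons_of_ne_nil hne
  unfold collapse_seq_forGenus
  simp only [PySem.List.pyGet?_zero_cons, Option.getD_some, List.headD_cons]
  rw [PySem.Str.len, PySem.List.pyRange_one]
  simp only [Int.sub_zero, Int.toNat_natCast, List.foldl_map]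
  refine congrArg String.mk ?_
  trans (List.foldl
      (fun (acc : List Char) (y : Nat) => acc ++ [aChar (s0 :: rest) (0 + (y : Int))]) []
      (List.range s0.toList.length))
  · apply PySem.List.foldl_congr_mem
    intro acc y _
    simp only [aChar]
    split_ifs <;> rfl
  · rw [PySem.List.foldl_append_singleton_eq_map, List.nil_append]
    apply List.map_congr_left
    intro k _
    exact aChar_eq (s0 :: rest) k

-- getD on the range-map states
theorem getD_state (n : Nat) (g : Nat → Option Char) (k : Nat) (hk : k < n) :
    ((List.range n).map g).getD k none = g k :=
  PySem.List.getD_map_range g n k none hk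

-- B's fold keeps the column-indexed shape
theorem foldB (n : Nat) (seqs : List String) (g : Nat → Option Char) :
    seqs.foldl
      (fun state seq =>
        (List.range n).map (fun i => updCell (state.getD i none) (seq.toList.getD i ' ')))
      ((List.range n).map g)
    = (List.range n).map
        (fun k => seqs.foldl (fun st s => updCell st (cchar s k)) (g k)) := by
  induction seqs generalizing g with
  | nil => simp
  | cons s ss ih =>
      simp only [List.foldl_cons]
      have hstep :
          (List.range n).map (fun i => updCell (((List.range n).map g).getD i none) (s.toList.getD i ' '))
          = (List.range n).map (fun k => updCell (g k) (cchar s k)) := by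
        apply List.map_congr_left
        intro k hk
        rw [List.mem_range] at hk
        rw [getD_state n g k hk, cchar]
      rw [hstep, ih]

theorem portB_eq (seqlist : List String) (h : Pre_collapse_seq_forGenus seqlist) :
    collapse_seq_forGenus_alt seqlist =
      String.mk ((List.range (seqlist.headD "").toList.length).map
        (fun k => (colB seqlist k).getD '-')) := by
  obtain ⟨hne, _⟩ := h
  obtain ⟨s0, rest, rfl⟩ := List.exists_cons_of_ne_nil hne
  unfold collapse_seq_forGenus_alt
  simp only [PySem.List.pyGet?_zero_cons, Option.getD_some, List.headD_cons]
  rw [show (List.replicate s0.toList.length (none : Option Char))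
        = (List.range s0.toList.length).map (fun _ => none) by
      simp [List.map_const', List.length_range]]
  rw [foldB]
  rw [List.map_map]
  rfl

-- 'N' is absorbing for updCell
theorem updCell_absorb (t : List Char) :
    t.foldl updCell (some 'N') = some 'N' := by
  induction t with
  | nil => rfl
  | cons c cs ih =>
      have : updCell (some 'N') c = some 'N' := by
        unfold updCell; split_ifs <;> simp_all
      simp [this, ih]

-- folding non-gap chars from an agreed char
theorem foldl_updCell_some (t : List Char) (a : Char) (ht : ∀ c ∈ t, nonGap c = true) :
    t.foldl updCell (some a) = if ∀ c ∈ t, c = a then some a else some 'N' := by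
  induction t generalizing a with
  | nil => simp
  | cons c cs ih =>
      have hc : ¬(c = '-' ∨ c = 'N') := by
        simpa [nonGap] using ht c List.mem_cons_self
      by_cases hca : c = a
      · subst hca
        have hstep : updCell (some c) c = some c := by simp [updCell, hc]
        rw [List.foldl_cons, hstep, ih c (fun d hd => ht d (List.mem_cons_of_mem _ hd))]
        by_cases hall : ∀ d ∈ cs, d = c
        · rw [if_pos hall, if_pos (by simpa using hall)]
        · rw [if_neg hall, if_neg (by simp only [List.forall_mem_cons]; tauto)]
      · have hac : ¬(a = c) := fun h => hca h.symm
        have hstep : updCell (some a) c = some 'N' := by simp [updCell, hc, hac]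
        rw [List.foldl_cons, hstep, updCell_absorb]
        rw [if_neg]
        intro hall
        exact hca (hall c List.mem_cons_self)

-- set of a nonempty list has one element iff all elements agree
theorem ofList_len_one (a : Char) (t : List Char) :
    (PySem.Set.ofList (a :: t)).length = 1 ↔ ∀ c ∈ t, c = a := by
  rw [PySem.Set.ofList_cons, List.length_cons]
  rw [show ((PySem.Set.ofList t).discard a).length + 1 = 1 ↔
        ((PySem.Set.ofList t).discard a).length = 0 from by omega]
  rw [List.length_eq_zero_iff]
  constructor
  · intro hnil c hc
    by_contra hne
    have hmem : c ∈ (PySem.Set.ofList t).discard a := by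
      simp [PySem.Set.discard, List.mem_filter, PySem.Set.mem_ofList, hc, hne]
    rw [hnil] at hmem
    exact absurd hmem (List.not_mem_nil)
  · intro h
    rw [List.eq_nil_iff_forall_not_mem]
    intro c hc
    rw [PySem.Set.discard, List.mem_filter] at hc
    obtain ⟨h1, h2⟩ := hc
    rw [PySem.Set.mem_ofList] at h1
    simp [h c h1] at h2

-- per-column agreement
theorem col_eq (seqlist : List String) (k : Nat) :
    (colB seqlist k).getD '-' = colA (colChars seqlist k) := by
  have hB : colB seqlist k = (colChars seqlist k).foldl updCell none := by
    rw [colB, colChars,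
        ← PySem.List.foldl_if_eq_foldl_filter nonGap updCell
          (seqlist.map (fun s => cchar s k)) (none : Option Char),
        List.foldl_map]
    apply PySem.List.foldl_congr_mem
    intro st s _
    set c := cchar s k with hc
    by_cases hng : nonGap c = true
    · have : ¬(c = '-' ∨ c = 'N') := by simpa [nonGap] using hng
      simp [hng, updCell, this]
    · have : c = '-' ∨ c = 'N' := by
        by_contra hcc; exact hng (by simpa [nonGap] using hcc)
      simp [hng, updCell, this]
  rw [hB]
  rcases hh : colChars seqlist k with _ | ⟨a, t⟩
  · simp [colA]
  · have hng : ∀ c ∈ a :: t, nonGap c = true := by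
      intro c hc
      have hmem : c ∈ colChars seqlist k := by rw [hh]; exact hc
      rw [colChars] at hmem
      exact (List.mem_filter.mp hmem).2
    have hna : nonGap a = true := hng a List.mem_cons_self
    have hna' : ¬(a = '-' ∨ a = 'N') := by simpa [nonGap] using hna
    simp only [List.foldl_cons]
    have h0 : updCell none a = some a := by simp [updCell, hna']
    rw [h0, foldl_updCell_some t a (fun c hc => hng c (List.mem_cons_of_mem _ hc))]
    rw [colA]
    by_cases hall : ∀ c ∈ t, c = a
    · obtain ⟨ys, y, hy⟩ := (a :: t).eq_nil_or_concat.resolve_left (by simp)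
      rw [List.concat_eq_append] at hy
      have hyin : y ∈ a :: t := by rw [hy]; simp
      have hya : y = a := by
        rcases List.mem_cons.mp hyin with h | h
        · exact h
        · exact hall y h
      have hlast : (a :: t).getLast?.getD ' ' = a := by rw [hy, hya]; simp
      rw [if_pos hall]
      simp [(ofList_len_one a t).mpr hall, hlast]
    · have hlen : (PySem.Set.ofList (a :: t)).length ≠ 1 := fun hc => hall ((ofList_len_one a t).mp hc)
      simp [hall, hlen]

-- ===== VERDICT (by name: the statement is the Claim_ definition above) =====
theorem collapse_seq_forGenus_spec : Claim_equal_collapse_seq_forGenus := by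
  intro seqlist _ hpre
  unfold Spec_collapse_seq_forGenus
  rw [portA_eq seqlist hpre, portB_eq seqlist hpre]
  congr 1
  apply List.map_congr_left
  intro k _
  exact (col_eq seqlist k).symm
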